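-- pv_equiv track=rewrite | github.com/dkuulis/aoc | 2025/d06.py | split_by_empty
-- ===== SOURCE A (Python) =====
-- def split_by_empty(arr):
--     result = []
--     current = []
--     for item in arr:
--         if not item:  # treat empty string or None as separator
--             result.append(current)
--             current = []
--         else:
--             current.append(item)
--     result.append(current)
--     return result
-- ===== SOURCE B (Python) =====
-- def split_by_empty(arr):
--     # Different decomposition: find all separator positions first, then
--     # build the groups by slicing between consecutive separators.
--     seps = [i for i, x in enumerate(arr) if not x]
--     out = []
--     prev = -1
--     for i in seps:
--         out.append(arr[prev + 1:i])
--         prev = i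
--     out.append(arr[prev + 1:])
--     return out
-- ===== Notes on version B (the rewrite author's own statement) =====
-- stated objective: alternative
-- what changed: Replaces the single accumulate-and-flush loop by a two-phase index-then-slice algorithm: first collect all separator indices, then emit each group as a slice of arr between consecutive separators.
import Mathlib
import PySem

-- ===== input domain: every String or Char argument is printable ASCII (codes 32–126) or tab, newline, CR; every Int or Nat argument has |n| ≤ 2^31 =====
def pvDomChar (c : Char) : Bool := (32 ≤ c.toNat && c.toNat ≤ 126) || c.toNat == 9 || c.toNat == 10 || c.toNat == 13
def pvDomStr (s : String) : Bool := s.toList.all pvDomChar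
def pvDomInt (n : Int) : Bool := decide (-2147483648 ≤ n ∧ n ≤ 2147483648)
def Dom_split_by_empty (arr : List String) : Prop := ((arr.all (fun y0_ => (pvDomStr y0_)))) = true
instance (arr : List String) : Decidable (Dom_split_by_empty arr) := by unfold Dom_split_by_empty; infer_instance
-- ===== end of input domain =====

-- B replaces A's accumulate-and-flush loop by a two-phase algorithm (collect separator
-- indices, then slice between consecutive separators); same cost, different decomposition.


-- ===== PORT A =====
-- the 'for item in arr' loop carrying (result, current); 'not item' on a string is '= ""'
def pvLoopA : List String → List (List String) → List String → List (List String)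
  | [], result, current => result ++ [current]
  | item :: rest, result, current =>
      if item = "" then pvLoopA rest (result ++ [current]) []
      else pvLoopA rest result (current ++ [item])

def split_by_empty (arr : List String) : List (List String) :=
  pvLoopA arr [] []

-- ===== PORT B =====
-- seps = [i for i, x in enumerate(arr) if not x]
def pvSepIdxs : List String → Int → List Int
  | [], _ => []
  | x :: rest, i => if x = "" then i :: pvSepIdxs rest (i + 1) else pvSepIdxs rest (i + 1)

-- the 'for i in seps' loop carrying (out, prev), then the trailing slice arr[prev+1:]
def pvBuildSlices (arr : List String) : List Int → Int → List (List String) → List (List String)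
  | [], prev, out => out ++ [PySem.List.slice arr (some (prev + 1)) none]
  | i :: seps, prev, out =>
      pvBuildSlices arr seps i (out ++ [PySem.List.slice arr (some (prev + 1)) (some i)])

def split_by_empty_alt (arr : List String) : List (List String) :=
  pvBuildSlices arr (pvSepIdxs arr 0) (-1) []

-- ===== PRECONDITION & SPEC =====
def Spec_split_by_empty (arr : List String) (out : List (List String)) : Prop := out = split_by_empty_alt arr
instance (arr : List String) (out : List (List String)) : Decidable (Spec_split_by_empty arr out) := by unfold Spec_split_by_empty; infer_instance

-- ===== CLAIM (what is proved, stated in full; the proofs are below) =====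
def Claim_equal_split_by_empty : Prop := ∀ (arr : List String), Dom_split_by_empty arr → Spec_split_by_empty arr (split_by_empty arr)

-- ===== LEMMAS AND PROOFS =====

-- canonical recursive splitting both ports are reduced to
def pvSplitRec : List String → List (List String)
  | [] => [[]]
  | x :: rest =>
      if x = "" then [] :: pvSplitRec rest
      else
        match pvSplitRec rest with
        | [] => [[x]]
        | g :: gs => (x :: g) :: gs

theorem pvSplitRec_ne_nil (l : List String) : pvSplitRec l ≠ [] := by
  cases l with
  | nil => simp [pvSplitRec]
  | cons x rest =>
      simp only [pvSplitRec]
      split_ifs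
      · simp
      · cases pvSplitRec rest <;> simp

theorem pvModifyHead_nil_append (l : List (List String)) :
    l.modifyHead (fun g => ([] : List String) ++ g) = l := by
  cases l <;> simp

theorem pvLoopA_eq (l : List String) :
    ∀ (res : List (List String)) (cur : List String),
      pvLoopA l res cur = res ++ (pvSplitRec l).modifyHead (fun g => cur ++ g) := by
  induction l with
  | nil => intro res cur; simp [pvLoopA, pvSplitRec]
  | cons x rest ih =>
      intro res cur
      simp only [pvLoopA, pvSplitRec]
      by_cases hx : x = ""
      · rw [if_pos hx, if_pos hx, ih, pvModifyHead_nil_append]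
        simp [List.modifyHead]
      · rw [if_neg hx, if_neg hx, ih]
        rcases h : pvSplitRec rest with _ | ⟨g, gs⟩
        · exact absurd h (pvSplitRec_ne_nil rest)
        · simp [List.modifyHead]

theorem pvBuildSlices_eq (arr : List String) :
    ∀ (rest : List String) (i k : Nat) (out : List (List String)),
      arr.drop i = rest → k ≤ i → i ≤ arr.length →
      pvBuildSlices arr (pvSepIdxs rest (i : Int)) ((k : Int) - 1) out
        = out ++ (pvSplitRec rest).modifyHead (fun g => (arr.drop k).take (i - k) ++ g) := by
  intro rest
  induction rest with
  | nil =>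
      intro i k out hdrop hk hi
      have hlen : arr.length ≤ i := by
        have := congrArg List.length hdrop
        simp at this; omega
      have hi' : i = arr.length := le_antisymm hi hlen
      have h1 : (k : Int) - 1 + 1 = (k : Nat) := by ring
      simp only [pvSepIdxs, pvBuildSlices, h1, PySem.List.slice_from_natCast, pvSplitRec,
        List.modifyHead]
      have : (arr.drop k).take (i - k) = arr.drop k := by
        apply List.take_of_length_le; simp; omega
      simp [this]
  | cons x rest' ih =>
      intro i k out hdrop hk hi
      have hlt : i < arr.length := by
        have := congrArg List.length hdrop
        simp at this; omega
      have hdrop' : arr.drop (i + 1) = rest' := by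
        have h2 : (arr.drop i).drop 1 = rest' := by rw [hdrop]; rfl
        rw [List.drop_drop] at h2
        simpa [Nat.add_comm] using h2
      have hxi : arr[i]? = some x := by
        have h0 : (arr.drop i)[0]? = arr[i + 0]? := List.getElem?_drop
        rw [hdrop] at h0
        simpa using h0.symm
      have h1 : (k : Int) - 1 + 1 = ((k : Nat) : Int) := by ring
      have hcast : ((i : Nat) : Int) + 1 = ((i + 1 : Nat) : Int) := by push_cast; ring
      by_cases hx : x = ""
      · -- separator: flush the pending slice arr[k:i]
        simp only [pvSepIdxs, if_pos hx, pvBuildSlices, h1, PySem.List.slice_natCast]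
        rw [hcast, show ((i : Nat) : Int) = ((i + 1 : Nat) : Int) - 1 by push_cast; ring,
          ih (i + 1) (i + 1) _ hdrop' (le_refl _) (by omega)]
        simp only [Nat.sub_self, List.take_zero, pvModifyHead_nil_append]
        simp [pvSplitRec, hx, List.modifyHead]
      · -- non-separator: the pending slice grows by one element
        have htake : (arr.drop k).take (i + 1 - k) = (arr.drop k).take (i - k) ++ [x] := by
          have hs : i + 1 - k = (i - k) + 1 := by omega
          have hg : (arr.drop k)[i - k]? = arr[k + (i - k)]? := List.getElem?_drop
          rw [hs, List.take_add_one, hg, show k + (i - k) = i by omega, hxi]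
          rfl
        simp only [pvSepIdxs, if_neg hx]
        rw [hcast, ih (i + 1) k out hdrop' (by omega) (by omega), htake]
        simp only [pvSplitRec, if_neg hx]
        rcases h : pvSplitRec rest' with _ | ⟨g, gs⟩
        · exact absurd h (pvSplitRec_ne_nil rest')
        · simp [List.modifyHead]

-- ===== VERDICT (by name: the statement is the Claim_ definition above) =====
theorem split_by_empty_spec : Claim_equal_split_by_empty := by
  intro arr _
  unfold Spec_split_by_empty split_by_empty split_by_empty_alt
  have hB := pvBuildSlices_eq arr arr 0 0 [] (by simp) (le_refl _) (Nat.zero_le _)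
  simp only [Nat.cast_zero, zero_sub, Nat.sub_zero, List.drop_zero, List.take_zero,
    List.nil_append] at hB
  rw [hB, pvLoopA_eq, pvModifyHead_nil_append, List.nil_append]
  cases pvSplitRec arr <;> rfl
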